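-- pv_equiv track=rewrite | github.com/kelhad00/CBA-toolkit | IBPY_files/interaction_analysis.py | get_prev_n_exp
-- ===== SOURCE A (Python) =====
-- def get_prev_n_exp(lst, n, max_dist, append_none=True):
--     """return lists of n labels preceding each different label in a list.
--
--     Args:
--         lst (list of tuples): list of type [(start, stop, label)]
--         n (int): number of elements.
--         max_dist (int): maximum distance between elements, in number of elements.
--                         After this distance, labels are not considered preceding the current one,
--         append_none (bool, optional): fill with None if no more preceding label. Defaults to True.
--
--     Returns:
--         dict: {label: [preceding labels]}
--     """
--     dct = {}
--     for l in range(
--         n, len(lst)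
--     ):  # skip the first n elements (cannot assume they are None)
--         lab = lst[l][2]
--         if lab not in dct:
--             dct[lab] = []
--         temp = []
--         for ind_next in range(1, n + 1):
--             prev_close = lst[l - ind_next + 1][0]
--             prev_far = lst[l - ind_next][1]
--             if (prev_close - prev_far) <= max_dist:
--                 temp.append(lst[l - ind_next][2])
--             else:
--                 if append_none:
--                     temp.extend([None] * (n - ind_next + 1))
--                 break
--         if len(temp) == n:
--             dct[lab].append(temp)
--     return dct
-- ===== SOURCE B (Python) =====
-- def get_prev_n_exp(lst, n, max_dist, append_none=True):
--     # Two-pass: precompute a run-length table of consecutive close gaps, then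
--     # read each window's usable length off the table instead of re-checking gaps.
--     m = len(lst)
--     # run[j] = number of consecutive gaps (lst[i][0] - lst[i-1][1] <= max_dist) ending at j
--     run = [0]
--     for j in range(1, m):
--         run.append(run[-1] + 1 if lst[j][0] - lst[j - 1][1] <= max_dist else 0)
--     dct = {}
--     for l in range(n, m):
--         lab = lst[l][2]
--         if lab not in dct:
--             dct[lab] = []
--         c = min(n, run[l])
--         row = [lst[l - k][2] for k in range(1, c + 1)]
--         if append_none:
--             row += [None] * (n - c)
--         if len(row) == n:  # only complete windows are recorded
--             dct[lab].append(row)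
--     return dct
-- ===== Notes on version B (the rewrite author's own statement) =====
-- stated objective: alternative
-- what changed: Replaces A's per-element break-on-gap inner scan with a precomputed run-length table of consecutive close gaps, so each window's usable length is read off the table and the row is built by a direct comprehension.
import Mathlib
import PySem

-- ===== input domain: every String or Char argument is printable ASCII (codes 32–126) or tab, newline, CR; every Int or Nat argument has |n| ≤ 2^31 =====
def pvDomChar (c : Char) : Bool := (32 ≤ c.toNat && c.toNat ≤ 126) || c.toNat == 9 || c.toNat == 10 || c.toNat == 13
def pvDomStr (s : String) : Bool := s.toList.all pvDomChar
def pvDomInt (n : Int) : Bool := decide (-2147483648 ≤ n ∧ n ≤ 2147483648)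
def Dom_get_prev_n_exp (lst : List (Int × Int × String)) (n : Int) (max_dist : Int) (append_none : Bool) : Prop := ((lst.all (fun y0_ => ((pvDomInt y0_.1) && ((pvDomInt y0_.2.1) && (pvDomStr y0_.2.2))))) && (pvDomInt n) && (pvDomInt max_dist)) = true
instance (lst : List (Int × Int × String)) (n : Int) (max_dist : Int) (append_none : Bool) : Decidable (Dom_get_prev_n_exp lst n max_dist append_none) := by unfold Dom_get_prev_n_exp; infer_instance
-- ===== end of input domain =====

-- B replaces A's break-on-gap inner scan by a precomputed run-length table of consecutive
-- close gaps (alternative decomposition, same cost).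

-- ===== PORT A =====
def gpnDef : Int × Int × String := (0, 0, "")

-- A's inner `for ind_next in range(1, n+1)` loop with its break; fuel = remaining iterations
def gpnTemp (lst : List (Int × Int × String)) (n : Int) (max_dist : Int) (l : Int)
    (append_none : Bool) : Nat → Int → List (Option String) → List (Option String)
  | 0, _, temp => temp
  | f+1, i, temp =>
    if (PySem.List.pyGetD lst (l - i + 1) gpnDef).1 - (PySem.List.pyGetD lst (l - i) gpnDef).2.1 ≤ max_dist then
      gpnTemp lst n max_dist l append_none f (i+1) (temp ++ [some (PySem.List.pyGetD lst (l - i) gpnDef).2.2])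
    else if append_none then temp ++ List.replicate (n - i + 1).toNat none else temp

def get_prev_n_exp (lst : List (Int × Int × String)) (n : Int) (max_dist : Int) (append_none : Bool) : List (String × List (List (Option String))) :=
  ((PySem.List.pyRange n (lst.length : Int) 1).foldl
    (fun dct l =>
      let lab := (PySem.List.pyGetD lst l gpnDef).2.2
      let dct := if dct.contains lab then dct else dct.insert lab []
      let temp := gpnTemp lst n max_dist l append_none n.toNat 1 []
      if (temp.length : Int) = n then dct.modify lab [] (· ++ [temp]) else dct)
    (PySem.Dict.empty : PySem.Dict String (List (List (Option String))))).items

-- ===== PORT B =====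
-- B's run-table loop: run[j] = number of consecutive close gaps ending at j
def gpnRun (lst : List (Int × Int × String)) (max_dist : Int) : List Int :=
  (PySem.List.pyRange 1 (lst.length : Int) 1).foldl
    (fun run j =>
      run ++ [if (PySem.List.pyGetD lst j gpnDef).1 - (PySem.List.pyGetD lst (j - 1) gpnDef).2.1 ≤ max_dist
              then PySem.List.pyGetD run (-1) 0 + 1 else 0]) [0]

def get_prev_n_exp_alt (lst : List (Int × Int × String)) (n : Int) (max_dist : Int) (append_none : Bool) : List (String × List (List (Option String))) :=
  let run : List Int := gpnRun lst max_dist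
  ((PySem.List.pyRange n (lst.length : Int) 1).foldl
    (fun dct l =>
      let lab := (PySem.List.pyGetD lst l gpnDef).2.2
      let dct := if dct.contains lab then dct else dct.insert lab []
      let c := min n (PySem.List.pyGetD run l 0)
      let row := (PySem.List.pyRange 1 (c + 1) 1).map (fun k => some (PySem.List.pyGetD lst (l - k) gpnDef).2.2)
      let row := if append_none then row ++ List.replicate (n - c).toNat (none : Option String) else row
      if (row.length : Int) = n then dct.modify lab [] (· ++ [row]) else dct)
    (PySem.Dict.empty : PySem.Dict String (List (List (Option String))))).items

-- ===== PRECONDITION & SPEC =====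
-- Pre_ excludes exactly the inputs where A raises IndexError: n < -len(lst) makes the
-- outer loop read lst[l] at a negative index below -len(lst).
def Pre_get_prev_n_exp (lst : List (Int × Int × String)) (n : Int) (max_dist : Int) (append_none : Bool) : Prop := -(lst.length : Int) ≤ n
instance (lst : List (Int × Int × String)) (n : Int) (max_dist : Int) (append_none : Bool) : Decidable (Pre_get_prev_n_exp lst n max_dist append_none) := by unfold Pre_get_prev_n_exp; infer_instance

def pvWitness_get_prev_n_exp : (List (Int × Int × String)) × Int × Int × Bool :=
  ([(0, 1, "a"), (2, 3, "b"), (5, 6, "a")], 1, 2, true)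

def Spec_get_prev_n_exp (lst : List (Int × Int × String)) (n : Int) (max_dist : Int) (append_none : Bool) (out : List (String × List (List (Option String)))) : Prop := out = get_prev_n_exp_alt lst n max_dist append_none
instance (lst : List (Int × Int × String)) (n : Int) (max_dist : Int) (append_none : Bool) (out : List (String × List (List (Option String)))) : Decidable (Spec_get_prev_n_exp lst n max_dist append_none out) := by unfold Spec_get_prev_n_exp; infer_instance

-- ===== CLAIM (what is proved, stated in full; the proofs are below) =====
def Claim_equal_get_prev_n_exp : Prop := ∀ (lst : List (Int × Int × String)) (n : Int) (max_dist : Int) (append_none : Bool), Dom_get_prev_n_exp lst n max_dist append_none → Pre_get_prev_n_exp lst n max_dist append_none → Spec_get_prev_n_exp lst n max_dist append_none (get_prev_n_exp lst n max_dist append_none)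

-- ===== LEMMAS AND PROOFS =====

-- spec of B's run table
def gpnR (lst : List (Int × Int × String)) (max_dist : Int) : Nat → Int
  | 0 => 0
  | j+1 => if (PySem.List.pyGetD lst ((j : Int) + 1) gpnDef).1 - (PySem.List.pyGetD lst (j : Int) gpnDef).2.1 ≤ max_dist
           then gpnR lst max_dist j + 1 else 0

-- common shape of one window: labels while gaps are close, then the break/pad
def gpnCP (lst : List (Int × Int × String)) (max_dist : Int) (append_none : Bool) : Int → Nat → List (Option String)
  | _, 0 => []
  | j, f+1 =>
    if (PySem.List.pyGetD lst j gpnDef).1 - (PySem.List.pyGetD lst (j - 1) gpnDef).2.1 ≤ max_dist then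
      some (PySem.List.pyGetD lst (j - 1) gpnDef).2.2 :: gpnCP lst max_dist append_none (j - 1) f
    else if append_none then List.replicate (f+1) none else []

theorem gpnR_nonneg (lst : List (Int × Int × String)) (md : Int) (j : Nat) : 0 ≤ gpnR lst md j := by
  induction j with
  | zero => simp [gpnR]
  | succ j ih => unfold gpnR; split <;> omega

theorem gpnTemp_eq_CP (lst : List (Int × Int × String)) (n md l : Int) (ap : Bool) :
    ∀ (f : Nat) (i : Int) (temp : List (Option String)), i = n - (f : Int) + 1 →
      gpnTemp lst n md l ap f i temp = temp ++ gpnCP lst md ap (l - i + 1) f := by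
  intro f
  induction f generalizing l with
  | zero => intro i temp _; simp [gpnTemp, gpnCP]
  | succ f ih =>
    intro i temp hi
    unfold gpnTemp gpnCP
    have h1 : l - i + 1 - 1 = l - i := by omega
    rw [h1]
    by_cases hlink : (PySem.List.pyGetD lst (l - i + 1) gpnDef).1 - (PySem.List.pyGetD lst (l - i) gpnDef).2.1 ≤ md
    · rw [if_pos hlink, if_pos hlink, ih l (i+1) _ (by push_cast at hi ⊢ <;> omega)]
      have h2 : l - (i + 1) + 1 = l - i := by omega
      rw [h2]
      simp
    · rw [if_neg hlink, if_neg hlink]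
      have h3 : (n - i + 1).toNat = f + 1 := by push_cast at hi; omega
      rw [h3]
      split <;> simp

theorem gpnCP_eq_row (lst : List (Int × Int × String)) (md : Int) (ap : Bool) :
    ∀ (f : Nat) (j : Int), (f : Int) ≤ j →
      gpnCP lst md ap j f =
        (List.range (min (f : Int) (gpnR lst md j.toNat)).toNat).map
          (fun (k : Nat) => some (PySem.List.pyGetD lst (j - 1 - (k : Int)) gpnDef).2.2)
        ++ (if ap then List.replicate ((f : Int) - min (f : Int) (gpnR lst md j.toNat)).toNat (none : Option String) else []) := by
  intro f
  induction f with
  | zero =>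
    intro j _
    have h0 := gpnR_nonneg lst md j.toNat
    have hm : min ((0:Nat) : Int) (gpnR lst md j.toNat) = 0 := by omega
    rw [hm]
    simp [gpnCP]
  | succ f ih =>
    intro j hj
    have hj1 : (1:Int) ≤ j := by push_cast at hj; omega
    obtain ⟨j', hj'⟩ : ∃ j' : Nat, j.toNat = j' + 1 := ⟨j.toNat - 1, by omega⟩
    have hcastj : ((j' : Int) + 1) = j := by omega
    have hcastj' : ((j' : Int)) = j - 1 := by omega
    have hRsucc : gpnR lst md (j' + 1) =
        if (PySem.List.pyGetD lst ((j' : Int) + 1) gpnDef).1 - (PySem.List.pyGetD lst ((j' : Int)) gpnDef).2.1 ≤ md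
        then gpnR lst md j' + 1 else 0 := by rw [gpnR]
    have hRunf : gpnR lst md j.toNat =
        if (PySem.List.pyGetD lst j gpnDef).1 - (PySem.List.pyGetD lst (j - 1) gpnDef).2.1 ≤ md
        then gpnR lst md j' + 1 else 0 := by
      rw [hj', hRsucc, hcastj, hcastj']
    have hRnn := gpnR_nonneg lst md j'
    unfold gpnCP
    rw [hRunf]
    by_cases hlink : (PySem.List.pyGetD lst j gpnDef).1 - (PySem.List.pyGetD lst (j - 1) gpnDef).2.1 ≤ md
    · rw [if_pos hlink, if_pos hlink]
      have hfj : (f : Int) ≤ j - 1 := by push_cast at hj ⊢; omega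
      have hjt : (j - 1).toNat = j' := by omega
      rw [ih (j - 1) hfj, hjt]
      have hmin : min (((f : Nat) + 1 : Nat) : Int) (gpnR lst md j' + 1) = min (f : Int) (gpnR lst md j') + 1 := by
        push_cast; omega
      rw [hmin]
      have hcnn : 0 ≤ min (f : Int) (gpnR lst md j') := by omega
      have h1 : (min (f : Int) (gpnR lst md j') + 1).toNat = (min (f : Int) (gpnR lst md j')).toNat + 1 := by omega
      have h2 : ((((f : Nat) + 1 : Nat)) : Int) - (min (f : Int) (gpnR lst md j') + 1) = (f : Int) - min (f : Int) (gpnR lst md j') := by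
        push_cast; omega
      rw [h1, h2, List.range_succ_eq_map]
      simp only [List.map_cons, List.map_map, Int.natCast_zero, List.cons_append]
      congr 2
      · norm_num
      · apply List.map_congr_left
        intro k _
        have harg : j - 1 - ((k : Int) + 1) = j - 1 - 1 - (k : Int) := by omega
        simp [Function.comp, harg]
    · rw [if_neg hlink, if_neg hlink]
      have hm : min (((f : Nat) + 1 : Nat) : Int) (0:Int) = 0 := by push_cast; omega
      rw [hm]
      simp

-- characterisation of B's run-table fold
theorem gpnRun_eq (lst : List (Int × Int × String)) (md : Int) :
    ∀ (t : Nat),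
      (PySem.List.pyRange 1 (1 + (t : Int)) 1).foldl
        (fun run j =>
          run ++ [if (PySem.List.pyGetD lst j gpnDef).1 - (PySem.List.pyGetD lst (j - 1) gpnDef).2.1 ≤ md
                  then PySem.List.pyGetD run (-1) 0 + 1 else 0]) [0]
        = (List.range (t + 1)).map (gpnR lst md) := by
  intro t
  induction t with
  | zero => simp [PySem.List.pyRange_one_eq_nil, gpnR]
  | succ t ih =>
    have hsplit : (1 : Int) + ((t : Nat) + 1 : Nat) = (1 + (t : Int)) + 1 := by push_cast; ring
    rw [hsplit, PySem.List.pyRange_one_succ_right (by omega), List.foldl_append, ih]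
    simp only [List.foldl_cons, List.foldl_nil]
    have hlast : PySem.List.pyGetD ((List.range (t + 1)).map (gpnR lst md)) (-1) 0 = gpnR lst md t := by
      rw [List.range_succ, List.map_append]
      simp [PySem.List.pyGetD_neg_one_append_singleton]
    rw [hlast]
    have hnew : (if (PySem.List.pyGetD lst (1 + (t : Int)) gpnDef).1 - (PySem.List.pyGetD lst (1 + (t : Int) - 1) gpnDef).2.1 ≤ md
                 then gpnR lst md t + 1 else 0) = gpnR lst md (t + 1) := by
      rw [gpnR]
      have e1 : (1 + (t : Int)) = (t : Int) + 1 := by ring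
      have e2 : ((t : Int) + 1 - 1) = (t : Int) := by ring
      rw [e1, e2]
    rw [hnew, List.range_succ (n := t + 1), List.map_append]
    simp

theorem gpnRun_eq' (lst : List (Int × Int × String)) (md : Int) (h : lst ≠ []) :
    gpnRun lst md = (List.range lst.length).map (gpnR lst md) := by
  have hlen : 1 ≤ lst.length := List.length_pos_of_ne_nil h
  have ht : (1 : Int) + ((lst.length - 1 : Nat) : Int) = (lst.length : Int) := by
    omega
  have hr : lst.length - 1 + 1 = lst.length := by omega
  unfold gpnRun
  rw [← ht, gpnRun_eq lst md (lst.length - 1), hr]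

theorem gpnRun_get (lst : List (Int × Int × String)) (md : Int) (l : Int)
    (h0 : 0 ≤ l) (h1 : l < (lst.length : Int)) :
    PySem.List.pyGetD (gpnRun lst md) l 0 = gpnR lst md l.toNat := by
  have hne : lst ≠ [] := by
    intro h; subst h; simp at h1; omega
  rw [gpnRun_eq' lst md hne]
  obtain ⟨k, rfl⟩ : ∃ k : Nat, l = (k : Int) := ⟨l.toNat, by omega⟩
  have hk : k < lst.length := by exact_mod_cast h1
  rw [PySem.List.pyGetD_natCast]
  simp [List.getD, hk]

-- the crux: for 0 ≤ n, A's inner loop computes exactly B's window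
theorem gpn_key (lst : List (Int × Int × String)) (n md : Int) (ap : Bool) (l : Int)
    (hl1 : n ≤ l) (hl2 : l < (lst.length : Int)) (hn : 0 ≤ n) :
    gpnTemp lst n md l ap n.toNat 1 [] =
      (if ap then
        (PySem.List.pyRange 1 (min n (PySem.List.pyGetD (gpnRun lst md) l 0) + 1) 1).map
          (fun k => some (PySem.List.pyGetD lst (l - k) gpnDef).2.2)
        ++ List.replicate (n - min n (PySem.List.pyGetD (gpnRun lst md) l 0)).toNat (none : Option String)
      else
        (PySem.List.pyRange 1 (min n (PySem.List.pyGetD (gpnRun lst md) l 0) + 1) 1).map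
          (fun k => some (PySem.List.pyGetD lst (l - k) gpnDef).2.2)) := by
  have hl0 : 0 ≤ l := by omega
  rw [gpnRun_get lst md l hl0 hl2]
  have hRnn := gpnR_nonneg lst md l.toNat
  have hnc : ((n.toNat : Nat) : Int) = n := by omega
  have hcnn : 0 ≤ min n (gpnR lst md l.toNat) := by omega
  set c : Int := min n (gpnR lst md l.toNat) with hc
  have hstep : gpnTemp lst n md l ap n.toNat 1 [] =
      (List.range c.toNat).map (fun (k : Nat) => some (PySem.List.pyGetD lst (l - 1 - (k : Int)) gpnDef).2.2)
      ++ (if ap then List.replicate (n - c).toNat (none : Option String) else []) := by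
    rw [gpnTemp_eq_CP lst n md l ap n.toNat 1 [] (by omega)]
    have he : l - 1 + 1 = l := by omega
    rw [he, gpnCP_eq_row lst md ap n.toNat l (by omega), hnc]
    simp only [List.nil_append, ← hc]
  rw [hstep]
  have hrange : (PySem.List.pyRange 1 (c + 1) 1).map
      (fun k => some (PySem.List.pyGetD lst (l - k) gpnDef).2.2)
      = (List.range c.toNat).map (fun (k : Nat) => some (PySem.List.pyGetD lst (l - 1 - (k : Int)) gpnDef).2.2) := by
    rw [PySem.List.pyRange_one]
    have : (c + 1 - 1).toNat = c.toNat := by omega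
    rw [this, List.map_map]
    apply List.map_congr_left
    intro k _
    have harg : l - (1 + (k : Int)) = l - 1 - (k : Int) := by omega
    simp [Function.comp, harg]
  rw [hrange]
  cases ap <;> simp

-- ===== VERDICT (by name: the statement is the Claim_ definition above) =====
theorem get_prev_n_exp_spec : Claim_equal_get_prev_n_exp := by
  intro lst n md ap hdom hpre
  unfold Spec_get_prev_n_exp
  simp only [get_prev_n_exp, get_prev_n_exp_alt]
  congr 1
  apply PySem.List.foldl_congr_mem
  intro dct l hl
  rw [PySem.List.mem_pyRange_one] at hl
  by_cases hn : 0 ≤ n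
  · rw [gpn_key lst n md ap l hl.1 hl.2 hn]
  · have hA : ¬ (((gpnTemp lst n md l ap n.toNat 1 []).length : Int) = n) := by
      have h0 : n.toNat = 0 := by omega
      rw [h0]
      simp [gpnTemp]
      omega
    have hc : min n (PySem.List.pyGetD (gpnRun lst md) l 0) ≤ n := min_le_left _ _
    have hrow : (PySem.List.pyRange 1 (min n (PySem.List.pyGetD (gpnRun lst md) l 0) + 1) 1) = [] :=
      PySem.List.pyRange_one_eq_nil (by omega)
    have hB : ¬ ((((if ap then
        (PySem.List.pyRange 1 (min n (PySem.List.pyGetD (gpnRun lst md) l 0) + 1) 1).map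
          (fun k => some (PySem.List.pyGetD lst (l - k) gpnDef).2.2)
        ++ List.replicate (n - min n (PySem.List.pyGetD (gpnRun lst md) l 0)).toNat (none : Option String)
      else
        (PySem.List.pyRange 1 (min n (PySem.List.pyGetD (gpnRun lst md) l 0) + 1) 1).map
          (fun k => some (PySem.List.pyGetD lst (l - k) gpnDef).2.2)).length : Nat) : Int) = n) := by
      rw [hrow]
      cases ap <;> simp <;> omega
    rw [if_neg hA, if_neg hB]
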